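-- pv_equiv track=rewrite | github.com/paiml/depyler | examples/hard_bit_count.py | leading_zeros_16
-- ===== SOURCE A (Python) =====
-- def leading_zeros_16(n: int) -> int:
--     """Count leading zeros in a 16-bit representation."""
--     if n == 0:
--         return 16
--     count: int = 0
--     bit_pos: int = 15
--     while bit_pos >= 0:
--         mask: int = 1 << bit_pos
--         if (n & mask) != 0:
--             return count
--         count = count + 1
--         bit_pos = bit_pos - 1
--     return count
-- ===== SOURCE B (Python) =====
-- def leading_zeros_16(n: int) -> int:
--     """Count leading zeros in a 16-bit representation."""
--     return 16 - (n & 0xFFFF).bit_length()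
-- ===== Notes on version B (the rewrite author's own statement) =====
-- stated objective: simpler
-- what changed: Replaces the 16-step bit-by-bit scan from bit 15 downward with a closed form: mask to 16 bits and return 16 - (n & 0xFFFF).bit_length().
import Mathlib
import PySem

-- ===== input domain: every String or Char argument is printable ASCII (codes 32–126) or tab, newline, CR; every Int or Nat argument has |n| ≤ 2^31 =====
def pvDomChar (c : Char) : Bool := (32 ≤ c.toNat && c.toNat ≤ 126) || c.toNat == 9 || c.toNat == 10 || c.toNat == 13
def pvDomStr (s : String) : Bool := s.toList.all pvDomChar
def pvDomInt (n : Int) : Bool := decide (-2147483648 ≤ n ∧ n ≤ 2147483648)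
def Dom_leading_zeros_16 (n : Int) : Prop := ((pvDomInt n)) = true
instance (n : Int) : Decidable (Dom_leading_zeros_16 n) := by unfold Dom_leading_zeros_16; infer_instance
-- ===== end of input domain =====

-- B replaces A's bit-by-bit scan with the closed form 16 - (n & 0xFFFF).bit_length(); objective: simpler.

-- ===== PORT A =====
-- while bit_pos >= 0: mask = 1 << bit_pos; if (n & mask) != 0: return count; count += 1; bit_pos -= 1
-- Recursion on b = bit_pos + 1 (b = 0 means bit_pos < 0, loop exits).
-- Python's `&` on arbitrary ints (two's complement) is exactly `Int.land`.
def lzLoopA (n count : Int) : Nat → Int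
  | 0 => count
  | b + 1 =>
    let mask : Int := ((1 <<< b : Nat) : Int)  -- mask = 1 << bit_pos
    if Int.land n mask ≠ 0 then count
    else lzLoopA n (count + 1) b

def leading_zeros_16 (n : Int) : Int :=
  if n = 0 then 16
  else lzLoopA n 0 16

-- ===== PORT B =====
-- Python's m.bit_length() for m ≥ 0 is exactly Nat.size.
def leading_zeros_16_alt (n : Int) : Int :=
  16 - ((Int.land n 65535).toNat.size : Int)

-- ===== PRECONDITION & SPEC =====
def Spec_leading_zeros_16 (n : Int) (out : Int) : Prop := out = leading_zeros_16_alt n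
instance (n : Int) (out : Int) : Decidable (Spec_leading_zeros_16 n out) := by unfold Spec_leading_zeros_16; infer_instance

-- ===== CLAIM (what is proved, stated in full; the proofs are below) =====
def Claim_equal_leading_zeros_16 : Prop := ∀ (n : Int), Dom_leading_zeros_16 n → Spec_leading_zeros_16 n (leading_zeros_16 n)

-- ===== LEMMAS AND PROOFS =====

-- Bit b of `Nat.ldiff (2^b) m`, written as a multiple of 2^b (mirrors Nat.and_two_pow).
theorem ldiff_two_pow (b m : Nat) :
    Nat.ldiff (2 ^ b) m = (!(m.testBit b)).toNat * 2 ^ b := by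
  apply Nat.eq_of_testBit_eq
  intro i
  rw [Nat.testBit_ldiff]
  cases hb : m.testBit b with
  | true =>
    simp only [Bool.not_true, Bool.toNat_false, Nat.zero_mul, Nat.zero_testBit]
    by_cases h : b = i
    · subst h; simp [hb]
    · simp [h]
  | false =>
    simp only [Bool.not_false, Bool.toNat_true, Nat.one_mul]
    by_cases h : b = i
    · subst h; simp [hb]
    · simp [h]

-- The loop's test: n & (1 << b) is zero iff bit b of n is clear (for any sign of n).
theorem land_two_pow_eq_zero_iff (n : Int) (b : Nat) :
    Int.land n (((2 ^ b : Nat) : Int)) = 0 ↔ n.testBit b = false := by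
  cases n with
  | ofNat m =>
    show Int.ofNat (m &&& 2 ^ b) = 0 ↔ m.testBit b = false
    rw [Nat.and_two_pow]
    cases hb : m.testBit b <;> simp
  | negSucc m =>
    show Int.ofNat (Nat.ldiff (2 ^ b) m) = 0 ↔ (!(m.testBit b)) = false
    rw [ldiff_two_pow]
    cases hb : m.testBit b <;> simp

-- k := (n & 65535).toNat keeps exactly the low 16 bits of n.
theorem toNat_land_testBit_low (n : Int) (j : Nat) (hj : j < 16) :
    (Int.land n 65535).toNat.testBit j = n.testBit j := by
  have h65535 : (65535 : Nat) = 2 ^ 16 - 1 := by norm_num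
  cases n with
  | ofNat m =>
    show (m &&& 65535).testBit j = m.testBit j
    rw [h65535, Nat.testBit_and, Nat.testBit_two_pow_sub_one]
    simp [hj]
  | negSucc m =>
    show (Nat.ldiff 65535 m).testBit j = !(m.testBit j)
    rw [h65535, Nat.testBit_ldiff, Nat.testBit_two_pow_sub_one]
    simp [hj]

theorem toNat_land_testBit_high (n : Int) (i : Nat) (hi : 16 ≤ i) :
    (Int.land n 65535).toNat.testBit i = false := by
  have h65535 : (65535 : Nat) = 2 ^ 16 - 1 := by norm_num
  cases n with
  | ofNat m =>
    show (m &&& 65535).testBit i = false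
    rw [h65535, Nat.testBit_and, Nat.testBit_two_pow_sub_one]
    simp; omega
  | negSucc m =>
    show (Nat.ldiff 65535 m).testBit i = false
    rw [h65535, Nat.testBit_ldiff, Nat.testBit_two_pow_sub_one]
    simp; omega

theorem toNat_land_lt (n : Int) : (Int.land n 65535).toNat < 2 ^ 16 := by
  by_contra h
  obtain ⟨i, hi, hbit⟩ := Nat.exists_ge_and_testBit_of_ge_two_pow (Nat.le_of_not_lt h)
  rw [toNat_land_testBit_high n i hi] at hbit
  exact Bool.false_ne_true hbit

-- Int.testBit on a Nat cast is Nat.testBit (definitional).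
theorem testBit_natCast (k b : Nat) : Int.testBit ((k : Nat) : Int) b = k.testBit b := rfl

-- The loop only looks at bits below its bound, so n can be replaced by its low 16 bits.
theorem lzLoopA_congr (n : Int) (b : Nat) (hb : b ≤ 16) (count : Int) :
    lzLoopA n count b = lzLoopA (((Int.land n 65535).toNat : Nat) : Int) count b := by
  induction b generalizing count with
  | zero => rfl
  | succ b ih =>
    have hb' : b < 16 := by omega
    have hmask : ((1 <<< b : Nat) : Int) = (((2 ^ b : Nat) : Nat) : Int) := by
      rw [Nat.one_shiftLeft]
    have hcond : (Int.land n ((1 <<< b : Nat) : Int) = 0) ↔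
        (Int.land (((Int.land n 65535).toNat : Nat) : Int) ((1 <<< b : Nat) : Int) = 0) := by
      rw [hmask, land_two_pow_eq_zero_iff, land_two_pow_eq_zero_iff,
        testBit_natCast, toNat_land_testBit_low n b hb']
    show (if Int.land n ((1 <<< b : Nat) : Int) ≠ 0 then count else lzLoopA n (count + 1) b)
        = (if Int.land (((Int.land n 65535).toNat : Nat) : Int) ((1 <<< b : Nat) : Int) ≠ 0 then count
           else lzLoopA (((Int.land n 65535).toNat : Nat) : Int) (count + 1) b)
    by_cases h : Int.land n ((1 <<< b : Nat) : Int) = 0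
    · rw [if_neg (not_not_intro h), if_neg (not_not_intro (hcond.mp h))]
      exact ih (by omega) (count + 1)
    · rw [if_pos h, if_pos (fun hc => h (hcond.mpr hc))]

-- Value of the loop on a nonnegative input below its bound: count + b - bit_length.
theorem lzLoopA_val (b : Nat) (k : Nat) (count : Int) (hk : k < 2 ^ b) :
    lzLoopA ((k : Nat) : Int) count b = count + (b : Int) - (k.size : Int) := by
  induction b generalizing count with
  | zero =>
    have : k = 0 := by omega
    subst this
    simp [lzLoopA, Nat.size_zero]
  | succ b ih =>
    have hmask : Int.land ((k : Nat) : Int) ((1 <<< b : Nat) : Int)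
        = (((k &&& 2 ^ b : Nat) : Nat) : Int) := by
      rw [Nat.one_shiftLeft]; rfl
    show (if Int.land ((k : Nat) : Int) ((1 <<< b : Nat) : Int) ≠ 0 then count
          else lzLoopA ((k : Nat) : Int) (count + 1) b)
        = count + ((b + 1 : Nat) : Int) - (k.size : Int)
    rw [hmask, Nat.and_two_pow]
    cases hb : k.testBit b with
    | true =>
      rw [if_pos (by simp)]
      have h1 : 2 ^ b ≤ k := Nat.ge_two_pow_of_testBit hb
      have h2 : b < k.size := Nat.lt_size.mpr h1
      have h3 : k.size ≤ b + 1 := Nat.size_le.mpr hk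
      have : k.size = b + 1 := by omega
      rw [this]; push_cast; ring
    | false =>
      rw [if_neg (by simp)]
      have hk' : k < 2 ^ b := by
        by_contra h
        rw [Nat.testBit_of_two_pow_le_and_two_pow_add_one_gt (Nat.le_of_not_lt h) hk] at hb
        exact Bool.true_eq_false.mp hb
      rw [ih (count + 1) hk']
      push_cast; ring

-- ===== VERDICT (by name: the statement is the Claim_ definition above) =====
theorem leading_zeros_16_spec : Claim_equal_leading_zeros_16 := by
  intro n _
  unfold Spec_leading_zeros_16 leading_zeros_16 leading_zeros_16_alt
  by_cases h0 : n = 0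
  · subst h0
    rw [if_pos rfl]
    show (16 : Int) = 16 - ((Int.ofNat (0 &&& 65535)).toNat.size : Int)
    norm_num
  · rw [if_neg h0, lzLoopA_congr n 16 (le_refl 16) 0,
      lzLoopA_val 16 (Int.land n 65535).toNat 0 (toNat_land_lt n)]
    push_cast; ring
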